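-- pv_equiv track=rewrite | github.com/marjack222/analisis-financiero-tecnico | appdeanalisisfundamentalytecnica2.py | sugerir_accion
-- ===== SOURCE A (Python) =====
-- def sugerir_accion(interps):
--     # Si alguna interpretaci贸n es "Alta deuda" o "Sobrevalorado", sugerir "Evaluar caso a caso"
--     if "Alta deuda" in interps or "Sobrevalorado" in interps:
--         return "Evaluar caso a caso"
--     if all(v == "Infravalorado" or v == "Baja deuda" for v in interps):
--         return "Comprar"
--     if all(v == "Sobrevalorado" or v == "Alta deuda" for v in interps):
--         return "Vender"
--     if all(v == "Razonable" or v == "Deuda razonable" for v in interps):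
--         return "Mantener"
--     return "Evaluar caso a caso"
-- ===== SOURCE B (Python) =====
-- def sugerir_accion(interps):
--     # Single pass: accumulate three flags instead of A's staged membership/all() scans.
--     bad, buy, hold = False, True, True
--     for v in interps:
--         bad = bad or v == "Alta deuda" or v == "Sobrevalorado"
--         buy = buy and (v == "Infravalorado" or v == "Baja deuda")
--         hold = hold and (v == "Razonable" or v == "Deuda razonable")
--     if bad:
--         return "Evaluar caso a caso"
--     if buy:
--         return "Comprar"
--     if hold:
--         return "Mantener"
--     return "Evaluar caso a caso"
-- ===== Notes on version B (the rewrite author's own statement) =====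
-- stated objective: alternative
-- what changed: Replaces A's staged scans (two membership tests plus three all()-generator passes) with a single loop over the list that accumulates three boolean flags, deciding the action once at the end; the unreachable 'Vender' branch disappears.
import Mathlib
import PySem

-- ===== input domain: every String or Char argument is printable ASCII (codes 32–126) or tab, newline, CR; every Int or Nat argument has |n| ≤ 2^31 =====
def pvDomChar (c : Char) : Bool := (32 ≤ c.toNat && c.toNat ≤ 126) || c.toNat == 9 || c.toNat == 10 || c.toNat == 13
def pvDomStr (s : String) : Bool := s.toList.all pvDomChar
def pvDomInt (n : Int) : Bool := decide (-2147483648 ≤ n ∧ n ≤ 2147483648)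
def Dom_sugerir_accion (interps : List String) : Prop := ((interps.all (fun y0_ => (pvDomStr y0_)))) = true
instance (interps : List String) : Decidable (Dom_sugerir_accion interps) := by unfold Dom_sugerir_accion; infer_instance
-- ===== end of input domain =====

-- B replaces A's staged scans (two membership tests and three all()-passes) with a
-- single fold accumulating three boolean flags (alternative decomposition, same cost).

-- ===== PORT A =====
def sugerir_accion (interps : List String) : String :=
  if interps.contains "Alta deuda" || interps.contains "Sobrevalorado" then
    "Evaluar caso a caso"
  else if interps.all (fun v => v == "Infravalorado" || v == "Baja deuda") then
    "Comprar"
  else if interps.all (fun v => v == "Sobrevalorado" || v == "Alta deuda") then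
    "Vender"
  else if interps.all (fun v => v == "Razonable" || v == "Deuda razonable") then
    "Mantener"
  else
    "Evaluar caso a caso"

-- ===== PORT B =====
def sugerir_accion_alt (interps : List String) : String :=
  let flags : Bool × Bool × Bool :=
    interps.foldl
      (fun st v =>
        (st.1 || v == "Alta deuda" || v == "Sobrevalorado",
         st.2.1 && (v == "Infravalorado" || v == "Baja deuda"),
         st.2.2 && (v == "Razonable" || v == "Deuda razonable")))
      (false, true, true)
  if flags.1 then "Evaluar caso a caso"
  else if flags.2.1 then "Comprar"
  else if flags.2.2 then "Mantener"
  else "Evaluar caso a caso"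

-- ===== PRECONDITION & SPEC =====
def Spec_sugerir_accion (interps : List String) (out : String) : Prop := out = sugerir_accion_alt interps
instance (interps : List String) (out : String) : Decidable (Spec_sugerir_accion interps out) := by unfold Spec_sugerir_accion; infer_instance

-- ===== CLAIM =====
def Claim_equal_sugerir_accion : Prop := ∀ (interps : List String), Dom_sugerir_accion interps → Spec_sugerir_accion interps (sugerir_accion interps)

-- ===== LEMMAS AND PROOFS =====

-- Characterisation of B's fold: each flag equals the corresponding staged scan of A.
theorem pv_fold_flags (interps : List String) (b u h : Bool) :
    interps.foldl
      (fun st v =>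
        (st.1 || v == "Alta deuda" || v == "Sobrevalorado",
         st.2.1 && (v == "Infravalorado" || v == "Baja deuda"),
         st.2.2 && (v == "Razonable" || v == "Deuda razonable")))
      (b, u, h)
    = (b || interps.contains "Alta deuda" || interps.contains "Sobrevalorado",
       u && interps.all (fun v => v == "Infravalorado" || v == "Baja deuda"),
       h && interps.all (fun v => v == "Razonable" || v == "Deuda razonable")) := by
  induction interps generalizing b u h with
  | nil => simp
  | cons x xs ih =>
      simp only [List.foldl_cons, ih, List.contains_cons, List.all_cons]
      refine Prod.ext ?_ (Prod.ext ?_ ?_)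
      · apply Bool.eq_iff_iff.mpr; simp; tauto
      · simp [Bool.and_assoc]
      · simp [Bool.and_assoc]

-- If no flagged string occurs yet every element is flagged, the list is empty
-- (so A's "Vender" branch is reachable only on [], where the "Comprar" branch already fired).
theorem pv_vender_empty (interps : List String)
    (h1 : ¬("Alta deuda" ∈ interps ∨ "Sobrevalorado" ∈ interps))
    (h3 : (interps.all fun v => v == "Sobrevalorado" || v == "Alta deuda") = true) :
    interps = [] := by
  rcases interps with _ | ⟨x, xs⟩
  · rfl
  · exfalso
    have := (List.all_eq_true.mp h3) x (by simp)
    rcases (by simpa using this : x = "Sobrevalorado" ∨ x = "Alta deuda") with rfl | rfl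
    · exact h1 (Or.inr (by simp))
    · exact h1 (Or.inl (by simp))

-- ===== VERDICT =====
theorem sugerir_accion_spec : Claim_equal_sugerir_accion := by
  intro interps _
  show sugerir_accion interps = sugerir_accion_alt interps
  simp only [sugerir_accion, sugerir_accion_alt, pv_fold_flags, Bool.false_or, Bool.true_and]
  by_cases h1 : "Alta deuda" ∈ interps ∨ "Sobrevalorado" ∈ interps
  · have hb : (interps.contains "Alta deuda" || interps.contains "Sobrevalorado") = true := by
      rcases h1 with h | h <;> simp [h]
    rw [if_pos hb, if_pos hb]
  · have hb : ¬ (interps.contains "Alta deuda" || interps.contains "Sobrevalorado") = true := by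
      simp [not_or.mp h1]
    rw [if_neg hb, if_neg hb]
    by_cases h2 : (interps.all fun v => v == "Infravalorado" || v == "Baja deuda") = true
    · rw [if_pos h2, if_pos h2]
    · have hv : ¬ (interps.all fun v => v == "Sobrevalorado" || v == "Alta deuda") = true :=
        fun h3 => h2 (by rw [pv_vender_empty interps h1 h3]; rfl)
      rw [if_neg h2, if_neg h2, if_neg hv]
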